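-- pv_equiv track=rewrite | github.com/remusao/katas | hashcode/2015/final_extended/main.py | compute_cov
-- ===== SOURCE A (Python) =====
-- from collections import namedtuple, defaultdict
--
-- def columnsdist(c1, c2, C):
--     return min(abs(c1 - c2), C - abs(c1 - c2))
--
-- def iscovered(target, row, col, C, V):
--     u, v = target
--     return (row - u) ** 2 + columnsdist(col, v, C) ** 2 <= V * V
--
-- def compute_cov(R, C, targets, loon_radius):
--     """ For each cell in the grid, associated covered targets. """
--     cov = defaultdict(list)
--     for row in range(R):
--         for col in range(C):
--             for target_id, (target_row, target_col) in enumerate(targets):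
--                 if iscovered((target_row, target_col), row, col, C, loon_radius):
--                     cov[row, col].append(target_id)
--     return cov
-- ===== SOURCE B (Python) =====
-- from collections import defaultdict
--
--
-- def columnsdist(c1, c2, C):
--     return min(abs(c1 - c2), C - abs(c1 - c2))
--
--
-- def compute_cov(R, C, targets, loon_radius):
--     """ For each cell in the grid, associated covered targets.
--
--     Per row, prefilter the targets to those whose row distance already fits in
--     the radius; scan columns against that active list only, and build the
--     result dict directly in row-major order with complete per-cell lists.
--     """
--     V2 = loon_radius * loon_radius
--     cov = defaultdict(list)  # same container type as the original's return value
--     for row in range(R):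
--         active = [(i, (row - u) * (row - u), v)
--                   for i, (u, v) in enumerate(targets)
--                   if (row - u) * (row - u) <= V2]
--         if not active:
--             continue
--         for col in range(C):
--             ids = [i for i, dr2, v in active
--                    if dr2 + columnsdist(col, v, C) ** 2 <= V2]
--             if ids:
--                 cov[row, col] = ids
--     return cov
-- ===== Notes on version B (the rewrite author's own statement) =====
-- stated objective: alternative
-- what changed: B prefilters targets once per row by row-distance (skipping rows with no candidate entirely) and scans columns only against that active list, building the result dict with complete per-cell lists in row-major order instead of A's per-target appends inside the full R*C*T triple loop.
import Mathlib
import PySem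

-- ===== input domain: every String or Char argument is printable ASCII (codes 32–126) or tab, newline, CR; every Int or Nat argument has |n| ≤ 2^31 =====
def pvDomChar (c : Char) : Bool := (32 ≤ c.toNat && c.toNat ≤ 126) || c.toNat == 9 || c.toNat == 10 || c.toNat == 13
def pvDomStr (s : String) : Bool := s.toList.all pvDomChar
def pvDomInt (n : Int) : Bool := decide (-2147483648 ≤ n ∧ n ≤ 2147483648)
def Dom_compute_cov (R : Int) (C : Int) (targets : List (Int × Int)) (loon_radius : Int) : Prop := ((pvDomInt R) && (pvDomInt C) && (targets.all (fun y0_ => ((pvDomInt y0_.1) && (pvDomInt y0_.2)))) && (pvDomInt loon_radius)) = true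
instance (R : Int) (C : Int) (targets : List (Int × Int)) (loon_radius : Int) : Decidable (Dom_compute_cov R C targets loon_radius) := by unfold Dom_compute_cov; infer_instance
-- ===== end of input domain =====

-- B prefilters targets per row by row distance (skipping rows and cells with no candidates)
-- and builds the result in row-major order directly, instead of A's per-target appends over
-- the full R*C*T triple loop (an alternative decomposition of the same computation).


-- ===== PORT A =====
def columnsdist (c1 c2 C : Int) : Int := min (|c1 - c2|) (C - |c1 - c2|)

def iscovered (target : Int × Int) (row col C V : Int) : Bool :=
  decide ((row - target.1) ^ 2 + (columnsdist col target.2 C) ^ 2 ≤ V * V)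

def compute_cov (R : Int) (C : Int) (targets : List (Int × Int)) (loon_radius : Int) : List (Int × Int × List Int) :=
  ((PySem.List.pyRange 0 R 1).foldl (fun cov row =>
      (PySem.List.pyRange 0 C 1).foldl (fun cov col =>
        (PySem.List.enumerate targets).foldl (fun cov ti =>
          if iscovered ti.2 row col C loon_radius then
            cov.modify (row, col) [] (fun l => l ++ [ti.1])
          else cov) cov) cov) PySem.Dict.empty).items.map (fun p => (p.1.1, p.1.2, p.2))

-- ===== PORT B =====
def compute_cov_alt (R : Int) (C : Int) (targets : List (Int × Int)) (loon_radius : Int) : List (Int × Int × List Int) :=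
  let V2 := loon_radius * loon_radius
  (PySem.List.pyRange 0 R 1).foldl (fun out row =>
    let active : List (Int × Int × Int) :=
      (PySem.List.enumerate targets).filterMap (fun ti =>
        if (row - ti.2.1) * (row - ti.2.1) ≤ V2 then
          some (ti.1, (row - ti.2.1) * (row - ti.2.1), ti.2.2)
        else none)
    if active = [] then out
    else
      (PySem.List.pyRange 0 C 1).foldl (fun out col =>
        let ids : List Int := active.filterMap (fun t =>
          if t.2.1 + (columnsdist col t.2.2 C) ^ 2 ≤ V2 then some t.1 else none)
        if ids = [] then out else out ++ [(row, col, ids)]) out) []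

-- ===== PRECONDITION & SPEC =====
def Spec_compute_cov (R : Int) (C : Int) (targets : List (Int × Int)) (loon_radius : Int) (out : List (Int × Int × List Int)) : Prop := out = compute_cov_alt R C targets loon_radius
instance (R : Int) (C : Int) (targets : List (Int × Int)) (loon_radius : Int) (out : List (Int × Int × List Int)) : Decidable (Spec_compute_cov R C targets loon_radius out) := by unfold Spec_compute_cov; infer_instance

-- ===== CLAIM (what is proved, stated in full; the proofs are below) =====
def Claim_equal_compute_cov : Prop := ∀ (R : Int) (C : Int) (targets : List (Int × Int)) (loon_radius : Int), Dom_compute_cov R C targets loon_radius → Spec_compute_cov R C targets loon_radius (compute_cov R C targets loon_radius)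

-- ===== LEMMAS AND PROOFS =====

-- the per-cell list of covering target ids, the common denominator of both ports
def idsF (targets : List (Int × Int)) (C V row col : Int) : List Int :=
  (PySem.List.enumerate targets).filterMap
    (fun ti => if iscovered ti.2 row col C V then some ti.1 else none)

theorem pyRange_one_nodup (a b : Int) : (PySem.List.pyRange a b 1).Nodup := by
  have H : ∀ (n : Nat) (a : Int), (b - a).toNat = n → (PySem.List.pyRange a b 1).Nodup := by
    intro n
    induction n with
    | zero =>
      intro a h
      have hnil : PySem.List.pyRange a b 1 = [] := by
        rw [List.eq_nil_iff_forall_not_mem]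
        intro x hx
        rw [PySem.List.mem_pyRange_one] at hx
        omega
      simp [hnil]
    | succ n ih =>
      intro a h
      have hab : a < b := by omega
      rw [PySem.List.pyRange_one_cons hab]
      refine List.nodup_cons.mpr ⟨?_, ih (a + 1) (by omega)⟩
      rw [PySem.List.mem_pyRange_one]
      omega
  exact H (b - a).toNat a rfl

theorem foldl_if_filterMap {α β γ : Type} (p : α → Bool) (g : α → γ) (step : β → γ → β)
    (l : List α) (d : β) :
    l.foldl (fun d x => if p x then step d (g x) else d) d
      = (l.filterMap (fun x => if p x then some (g x) else none)).foldl step d := by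
  induction l generalizing d with
  | nil => rfl
  | cons x xs ih =>
    by_cases h : p x = true
    · simp [List.foldl_cons, h, ih]
    · simp only [Bool.not_eq_true] at h
      simp [List.foldl_cons, h, ih]

theorem dict_modify_snoc (pre : List ((Int × Int) × List Int)) (k : Int × Int)
    (acc : List Int) (i : Int) (hk : ∀ p ∈ pre, p.1 ≠ k) :
    PySem.Dict.modify (PySem.Dict.mk (pre ++ [(k, acc)])) k [] (fun l => l ++ [i])
      = PySem.Dict.mk (pre ++ [(k, acc ++ [i])]) := by
  have hfind : List.find? (fun p => p.1 == k) pre = none := by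
    rw [List.find?_eq_none]
    intro p hp
    simpa using hk p hp
  have hget : (PySem.Dict.mk (pre ++ [(k, acc)])).getD k [] = acc := by
    simp [PySem.Dict.getD, PySem.Dict.get?, List.find?_append, hfind]
  have hcont : (PySem.Dict.mk (pre ++ [(k, acc)])).contains k = true := by
    simp [PySem.Dict.contains]
  simp only [PySem.Dict.modify, PySem.Dict.insert, hcont, if_true, hget]
  congr 1
  simp only [List.map_append]
  congr 1
  · rw [List.map_congr_left (fun p hp => ?_), List.map_id]
    simp [hk p hp]
  · simp

theorem dict_modify_fresh (pre : List ((Int × Int) × List Int)) (k : Int × Int) (i : Int)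
    (hk : ∀ p ∈ pre, p.1 ≠ k) :
    PySem.Dict.modify (PySem.Dict.mk pre) k [] (fun l => l ++ [i])
      = PySem.Dict.mk (pre ++ [(k, [i])]) := by
  have hfind : List.find? (fun p => p.1 == k) pre = none := by
    rw [List.find?_eq_none]
    intro p hp
    simpa using hk p hp
  have hcont : (PySem.Dict.mk pre).contains k = false := by
    simp only [PySem.Dict.contains, List.any_eq_false]
    intro p hp
    simpa using hk p hp
  have hget : (PySem.Dict.mk pre).getD k [] = ([] : List Int) := by
    simp [PySem.Dict.getD, PySem.Dict.get?, hfind]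
  simp [PySem.Dict.modify, PySem.Dict.insert, hcont, hget]

theorem foldl_modify_ids (ids : List Int) (pre : List ((Int × Int) × List Int))
    (k : Int × Int) (acc : List Int) (hk : ∀ p ∈ pre, p.1 ≠ k) :
    ids.foldl (fun d i => PySem.Dict.modify d k [] (fun l => l ++ [i]))
        (PySem.Dict.mk (pre ++ [(k, acc)]))
      = PySem.Dict.mk (pre ++ [(k, acc ++ ids)]) := by
  induction ids generalizing acc with
  | nil => simp
  | cons i is ih =>
    rw [List.foldl_cons, dict_modify_snoc pre k acc i hk, ih (acc ++ [i])]
    simp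

theorem foldl_step_ids (ids : List Int) (pre : List ((Int × Int) × List Int))
    (k : Int × Int) (hk : ∀ p ∈ pre, p.1 ≠ k) :
    ids.foldl (fun d i => PySem.Dict.modify d k [] (fun l => l ++ [i])) (PySem.Dict.mk pre)
      = PySem.Dict.mk (if ids = [] then pre else pre ++ [(k, ids)]) := by
  cases ids with
  | nil => simp
  | cons i is =>
    rw [List.foldl_cons, dict_modify_fresh pre k i hk,
        foldl_modify_ids is pre k [i] hk]
    simp

set_option maxHeartbeats 1000000 in
theorem inner_cell (targets : List (Int × Int)) (C V row col : Int)
    (pre : List ((Int × Int) × List Int)) (hk : ∀ p ∈ pre, p.1 ≠ (row, col)) :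
    (PySem.List.enumerate targets).foldl (fun cov ti =>
        if iscovered ti.2 row col C V then
          PySem.Dict.modify cov (row, col) [] (fun l => l ++ [ti.1])
        else cov) (PySem.Dict.mk pre)
      = PySem.Dict.mk (if idsF targets C V row col = [] then pre
          else pre ++ [((row, col), idsF targets C V row col)]) := by
  have h1 := (foldl_if_filterMap (fun ti => iscovered ti.2 row col C V) (fun ti => ti.1)
      (fun d i => PySem.Dict.modify d (row, col) [] (fun l => l ++ [i]))
      (PySem.List.enumerate targets) (PySem.Dict.mk pre))
  exact h1.trans (foldl_step_ids (idsF targets C V row col) pre (row, col) hk)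

theorem foldl_ifP_append {α β : Type} (P : α → Prop) [DecidablePred P] (e : α → β)
    (l : List α) (acc : List β) :
    l.foldl (fun a x => if P x then a else a ++ [e x]) acc
      = acc ++ (l.filter (fun x => decide ¬ P x)).map e := by
  induction l generalizing acc with
  | nil => simp
  | cons x xs ih =>
    by_cases h : P x
    · simp [List.foldl_cons, h, ih]
    · simp [List.foldl_cons, h, ih]

theorem cols_fold (targets : List (Int × Int)) (C V row : Int) (cols : List Int)
    (pre : List ((Int × Int) × List Int)) (hnd : cols.Nodup)
    (hk : ∀ p ∈ pre, ∀ c ∈ cols, p.1 ≠ (row, c)) :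
    cols.foldl (fun cov col =>
        (PySem.List.enumerate targets).foldl (fun cov ti =>
          if iscovered ti.2 row col C V then
            PySem.Dict.modify cov (row, col) [] (fun l => l ++ [ti.1])
          else cov) cov) (PySem.Dict.mk pre)
      = PySem.Dict.mk (cols.foldl (fun acc col =>
          if idsF targets C V row col = [] then acc
          else acc ++ [((row, col), idsF targets C V row col)]) pre) := by
  induction cols generalizing pre with
  | nil => rfl
  | cons c cs ih =>
    rw [List.foldl_cons, List.foldl_cons,
        inner_cell targets C V row c pre (fun p hp => hk p hp c (by simp))]
    have hcnotin : c ∉ cs := (List.nodup_cons.mp hnd).1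
    by_cases h : idsF targets C V row c = []
    · rw [if_pos h]
      exact ih pre (List.nodup_cons.mp hnd).2 (fun p hp c' hc' => hk p hp c' (by simp [hc']))
    · rw [if_neg h]
      refine ih _ (List.nodup_cons.mp hnd).2 (fun p hp c' hc' => ?_)
      rcases List.mem_append.mp hp with hp' | hp'
      · exact hk p hp' c' (by simp [hc'])
      · have : p = ((row, c), idsF targets C V row c) := by simpa using hp'
        subst this
        intro hcontra
        simp only [Prod.mk.injEq] at hcontra
        exact hcnotin (hcontra.2 ▸ hc')

theorem rows_fold (targets : List (Int × Int)) (C V : Int) (rows : List Int)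
    (pre : List ((Int × Int) × List Int)) (hnd : rows.Nodup)
    (hk : ∀ p ∈ pre, p.1.1 ∉ rows) :
    rows.foldl (fun cov row =>
        (PySem.List.pyRange 0 C 1).foldl (fun cov col =>
          (PySem.List.enumerate targets).foldl (fun cov ti =>
            if iscovered ti.2 row col C V then
              PySem.Dict.modify cov (row, col) [] (fun l => l ++ [ti.1])
            else cov) cov) cov) (PySem.Dict.mk pre)
      = PySem.Dict.mk (rows.foldl (fun acc row =>
          (PySem.List.pyRange 0 C 1).foldl (fun acc col =>
            if idsF targets C V row col = [] then acc
            else acc ++ [((row, col), idsF targets C V row col)]) acc) pre) := by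
  induction rows generalizing pre with
  | nil => rfl
  | cons r rs ih =>
    rw [List.foldl_cons, List.foldl_cons,
        cols_fold targets C V r (PySem.List.pyRange 0 C 1) pre (pyRange_one_nodup 0 C)
          (fun p hp c _ => by
            intro hcontra
            exact (hk p hp) (by simp [hcontra, List.mem_cons]))]
    have hrnotin : r ∉ rs := (List.nodup_cons.mp hnd).1
    refine ih _ (List.nodup_cons.mp hnd).2 (fun p hp => ?_)
    rw [foldl_ifP_append (fun col => idsF targets C V r col = [])
        (fun col => ((r, col), idsF targets C V r col))] at hp
    rcases List.mem_append.mp hp with hp' | hp'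
    · exact fun hmem => hk p hp' (List.mem_cons_of_mem _ hmem)
    · rcases List.mem_map.mp hp' with ⟨c, _, rfl⟩
      simpa using hrnotin

theorem A_characterization (R C : Int) (targets : List (Int × Int)) (V : Int) :
    compute_cov R C targets V
      = ((PySem.List.pyRange 0 R 1).foldl (fun acc row =>
          (PySem.List.pyRange 0 C 1).foldl (fun acc col =>
            if idsF targets C V row col = [] then acc
            else acc ++ [((row, col), idsF targets C V row col)]) acc) []).map
          (fun p => (p.1.1, p.1.2, p.2)) := by
  unfold compute_cov
  rw [show (PySem.Dict.empty : PySem.Dict (Int × Int) (List Int)) = PySem.Dict.mk [] from rfl,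
      rows_fold targets C V (PySem.List.pyRange 0 R 1) [] (pyRange_one_nodup 0 R)
        (fun p hp => absurd hp (List.not_mem_nil))]

theorem ids_alt (targets : List (Int × Int)) (C V row col : Int) :
    ((PySem.List.enumerate targets).filterMap (fun ti =>
        if (row - ti.2.1) * (row - ti.2.1) ≤ V * V then
          some (ti.1, (row - ti.2.1) * (row - ti.2.1), ti.2.2)
        else none)).filterMap (fun t =>
        if t.2.1 + (columnsdist col t.2.2 C) ^ 2 ≤ V * V then some t.1 else none)
      = idsF targets C V row col := by
  rw [List.filterMap_filterMap]
  unfold idsF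
  apply List.filterMap_congr
  intro ti _
  have hsq : (row - ti.2.1) ^ 2 = (row - ti.2.1) * (row - ti.2.1) := sq (row - ti.2.1)
  by_cases h1 : (row - ti.2.1) * (row - ti.2.1) ≤ V * V
  · simp only [h1, if_true]
    simp [iscovered, hsq]
  · simp only [h1, if_false]
    have hnc : ¬ ((row - ti.2.1) ^ 2 + (columnsdist col ti.2.2 C) ^ 2 ≤ V * V) := by
      nlinarith [sq_nonneg (columnsdist col ti.2.2 C)]
    simp [iscovered, hnc]

theorem B_characterization (R C : Int) (targets : List (Int × Int)) (V : Int) :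
    compute_cov_alt R C targets V
      = (PySem.List.pyRange 0 R 1).foldl (fun acc row =>
          (PySem.List.pyRange 0 C 1).foldl (fun acc col =>
            if idsF targets C V row col = [] then acc
            else acc ++ [(row, col, idsF targets C V row col)]) acc) [] := by
  unfold compute_cov_alt
  simp only
  apply PySem.List.foldl_congr_mem
  intro out row hrow
  simp only [ids_alt]
  by_cases hact : (PySem.List.enumerate targets).filterMap (fun ti =>
      if (row - ti.2.1) * (row - ti.2.1) ≤ V * V then
        some (ti.1, (row - ti.2.1) * (row - ti.2.1), ti.2.2)
      else none) = []
  · rw [if_pos hact]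
    have hempty : ∀ col, idsF targets C V row col = [] := by
      intro col
      rw [← ids_alt targets C V row col, hact]
      rfl
    rw [foldl_ifP_append (fun col => idsF targets C V row col = [])
        (fun col => (row, col, idsF targets C V row col))]
    rw [List.filter_eq_nil_iff.mpr (fun c _ => by simp [hempty c])]
    simp
  · rw [if_neg hact]

theorem map_guarded_foldl (C : Int) (targets : List (Int × Int)) (V : Int)
    (rows : List Int) :
    ((rows.foldl (fun acc row =>
        (PySem.List.pyRange 0 C 1).foldl (fun acc col =>
          if idsF targets C V row col = [] then acc
          else acc ++ [((row, col), idsF targets C V row col)]) acc) []).map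
        (fun p => (p.1.1, p.1.2, p.2)))
      = rows.foldl (fun acc row =>
          (PySem.List.pyRange 0 C 1).foldl (fun acc col =>
            if idsF targets C V row col = [] then acc
            else acc ++ [(row, col, idsF targets C V row col)]) acc) [] := by
  have hA : ∀ (acc : List ((Int × Int) × List Int)) (row : Int),
      (PySem.List.pyRange 0 C 1).foldl (fun acc col =>
        if idsF targets C V row col = [] then acc
        else acc ++ [((row, col), idsF targets C V row col)]) acc
      = acc ++ ((PySem.List.pyRange 0 C 1).filter
          (fun col => decide ¬ (idsF targets C V row col = []))).map
          (fun col => ((row, col), idsF targets C V row col)) := fun acc row =>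
    foldl_ifP_append _ _ _ _
  have hB : ∀ (acc : List (Int × Int × List Int)) (row : Int),
      (PySem.List.pyRange 0 C 1).foldl (fun acc col =>
        if idsF targets C V row col = [] then acc
        else acc ++ [(row, col, idsF targets C V row col)]) acc
      = acc ++ ((PySem.List.pyRange 0 C 1).filter
          (fun col => decide ¬ (idsF targets C V row col = []))).map
          (fun col => (row, col, idsF targets C V row col)) := fun acc row =>
    foldl_ifP_append _ _ _ _
  rw [show (fun (acc : List ((Int × Int) × List Int)) (row : Int) =>
        (PySem.List.pyRange 0 C 1).foldl (fun acc col =>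
          if idsF targets C V row col = [] then acc
          else acc ++ [((row, col), idsF targets C V row col)]) acc)
      = fun acc row => acc ++ ((PySem.List.pyRange 0 C 1).filter
          (fun col => decide ¬ (idsF targets C V row col = []))).map
          (fun col => ((row, col), idsF targets C V row col))
      from funext fun acc => funext fun row => hA acc row]
  rw [show (fun (acc : List (Int × Int × List Int)) (row : Int) =>
        (PySem.List.pyRange 0 C 1).foldl (fun acc col =>
          if idsF targets C V row col = [] then acc
          else acc ++ [(row, col, idsF targets C V row col)]) acc)
      = fun acc row => acc ++ ((PySem.List.pyRange 0 C 1).filter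
          (fun col => decide ¬ (idsF targets C V row col = []))).map
          (fun col => (row, col, idsF targets C V row col))
      from funext fun acc => funext fun row => hB acc row]
  rw [PySem.List.foldl_append_eq_flatMap, PySem.List.foldl_append_eq_flatMap]
  simp [List.map_flatMap, Function.comp_def]

-- ===== VERDICT (by name: the statement is the Claim_ definition above) =====
theorem compute_cov_spec : Claim_equal_compute_cov := by
  intro R C targets loon_radius _
  unfold Spec_compute_cov
  rw [A_characterization, B_characterization, map_guarded_foldl]
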